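-- pv_equiv track=rewrite | github.com/ASTR0MNSTR/TheFateV | current/__stats__.py | up_lim_analysis
-- ===== SOURCE A (Python) =====
-- def empty_out(bins):
--     listed = []
--     for item in bins:
--         listed.append([])
--     return listed
--
-- def up_lim_analysis(x, ks, x_bids):
--     y_values = empty_out(x_bids)
--     result = []
--
--     for j, item in enumerate(x):
--         for i, pair in enumerate(x_bids):
--             if item >= pair[0] and item < pair[1]:
--                 y_values[i].append(ks[j])
--                 break
--
--     for bin in y_values:
--         k = 0
--         for element in bin:
--             if element == 1:
--                 k += 1
--         result.append(k < 0.5*len(bin))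
--     return result
-- ===== SOURCE B (Python) =====
-- def up_lim_analysis(x, ks, x_bids):
--     # one pass: per-bin (total, ones) counters instead of collecting per-bin lists
--     counts = [(0, 0)] * len(x_bids)
--     for item, k in zip(x, ks):
--         for i, (lo, hi) in enumerate(x_bids):
--             if lo <= item < hi:
--                 t, o = counts[i]
--                 counts[i] = (t + 1, o + (k == 1))
--                 break
--     return [2 * o < t for t, o in counts]
-- ===== Notes on version B (the rewrite author's own statement) =====
-- stated objective: simpler
-- what changed: B keeps only two integer counters (total, ones) per bin updated in the single binning pass and emits 2*ones < total, eliminating A's per-bin list collection and its whole second counting pass over those lists.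
import Mathlib
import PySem

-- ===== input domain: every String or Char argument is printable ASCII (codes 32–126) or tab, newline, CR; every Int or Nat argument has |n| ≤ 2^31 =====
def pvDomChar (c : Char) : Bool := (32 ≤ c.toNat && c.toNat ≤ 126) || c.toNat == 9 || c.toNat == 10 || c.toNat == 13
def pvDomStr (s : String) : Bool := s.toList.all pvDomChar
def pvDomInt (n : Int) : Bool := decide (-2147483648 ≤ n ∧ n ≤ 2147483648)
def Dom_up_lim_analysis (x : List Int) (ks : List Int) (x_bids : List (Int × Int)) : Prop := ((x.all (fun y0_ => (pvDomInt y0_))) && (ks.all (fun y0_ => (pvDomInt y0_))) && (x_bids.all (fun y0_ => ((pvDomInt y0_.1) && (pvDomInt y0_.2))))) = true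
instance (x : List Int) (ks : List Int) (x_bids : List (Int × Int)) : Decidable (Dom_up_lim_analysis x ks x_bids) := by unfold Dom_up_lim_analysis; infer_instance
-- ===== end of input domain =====

-- B replaces A's per-bin list collection + second counting pass by two per-bin integer counters
-- maintained in the single binning pass (objective: simpler); return value only, no mutation concerns.


-- ===== PORT A =====
-- empty_out: loop appending [] per bin
def empty_outA (bins : List (Int × Int)) : List (List Int) :=
  bins.foldl (fun listed _ => listed ++ [[]]) []

-- inner 'for i, pair in enumerate(x_bids): if match: y_values[i].append(ks[j]); break'
-- walking x_bids and y_values in step (they have equal length)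
def stepA (item kj : Int) : List (Int × Int) → List (List Int) → List (List Int)
  | [], yv => yv
  | _ :: _, [] => []
  | p :: ps, b :: bs =>
    if item ≥ p.1 && item < p.2 then (b ++ [kj]) :: bs
    else b :: stepA item kj ps bs

-- outer 'for j, item in enumerate(x)'; ks[j] totalized with getD (Pre_ excludes the IndexError inputs)
def loopA (ks : List Int) (x_bids : List (Int × Int)) : List (Int × Nat) → List (List Int) → List (List Int)
  | [], yv => yv
  | (item, j) :: rest, yv => loopA ks x_bids rest (stepA item (ks.getD j 0) x_bids yv)

-- 'k = 0; for element in bin: if element == 1: k += 1'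
def countA (bin : List Int) : Int :=
  bin.foldl (fun k element => if element == 1 then k + 1 else k) 0

def up_lim_analysis (x : List Int) (ks : List Int) (x_bids : List (Int × Int)) : List Bool :=
  let y_values := loopA ks x_bids x.zipIdx (empty_outA x_bids)
  -- 'k < 0.5*len(bin)' on integers is exactly 2*k < len(bin)
  y_values.foldl (fun result bin => result ++ [decide ((2 : Int) * countA bin < (bin.length : Int))]) []

-- ===== PORT B =====
-- inner scan updating the matched bin's (total, ones) pair, with break
def stepB (item k : Int) : List (Int × Int) → List (Int × Int) → List (Int × Int)
  | [], cs => cs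
  | _ :: _, [] => []
  | p :: ps, c :: cs =>
    if p.1 ≤ item && item < p.2 then (c.1 + 1, c.2 + (if k == 1 then 1 else 0)) :: cs
    else c :: stepB item k ps cs

def loopB (x_bids : List (Int × Int)) : List (Int × Int) → List (Int × Int) → List (Int × Int)
  | [], cs => cs
  | (item, k) :: rest, cs => loopB x_bids rest (stepB item k x_bids cs)

def up_lim_analysis_alt (x : List Int) (ks : List Int) (x_bids : List (Int × Int)) : List Bool :=
  let counts := loopB x_bids (x.zip ks) (List.replicate x_bids.length ((0 : Int), (0 : Int)))
  counts.map (fun c => decide (2 * c.2 < c.1))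

-- ===== PRECONDITION & SPEC =====
-- Pre_ excludes exactly the inputs on which A raises IndexError: some x[j] with j ≥ len(ks)
-- falling inside a bin (A then evaluates ks[j]).
def Pre_up_lim_analysis (x : List Int) (ks : List Int) (x_bids : List (Int × Int)) : Prop :=
  ∀ j : Nat, j < x.length → ks.length ≤ j →
    ∀ p ∈ x_bids, ¬(p.1 ≤ x.getD j 0 ∧ x.getD j 0 < p.2)
instance (x : List Int) (ks : List Int) (x_bids : List (Int × Int)) : Decidable (Pre_up_lim_analysis x ks x_bids) := by unfold Pre_up_lim_analysis; infer_instance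

def pvWitness_up_lim_analysis : List Int × List Int × (List (Int × Int)) :=
  ([0, 3, 7], [1, 0, 1], [(0, 2), (2, 5)])

def Spec_up_lim_analysis (x : List Int) (ks : List Int) (x_bids : List (Int × Int)) (out : List Bool) : Prop := out = up_lim_analysis_alt x ks x_bids
instance (x : List Int) (ks : List Int) (x_bids : List (Int × Int)) (out : List Bool) : Decidable (Spec_up_lim_analysis x ks x_bids out) := by unfold Spec_up_lim_analysis; infer_instance

-- ===== CLAIM (what is proved, stated in full; the proofs are below) =====
def Claim_equal_up_lim_analysis : Prop := ∀ (x : List Int) (ks : List Int) (x_bids : List (Int × Int)), Dom_up_lim_analysis x ks x_bids → Pre_up_lim_analysis x ks x_bids → Spec_up_lim_analysis x ks x_bids (up_lim_analysis x ks x_bids)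

-- ===== LEMMAS AND PROOFS =====

-- abstraction from A's per-bin lists to B's per-bin counters
def binAbs (b : List Int) : Int × Int := ((b.length : Int), countA b)

theorem countA_append_one (b : List Int) (kj : Int) :
    countA (b ++ [kj]) = countA b + (if kj == 1 then 1 else 0) := by
  simp only [countA, List.foldl_append, List.foldl_cons, List.foldl_nil]
  split <;> simp

theorem stepB_map_binAbs (item kj : Int) (ps : List (Int × Int)) (yv : List (List Int)) :
    stepB item kj ps (yv.map binAbs) = (stepA item kj ps yv).map binAbs := by
  induction ps generalizing yv with
  | nil => simp [stepA, stepB]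
  | cons p ps ih =>
    cases yv with
    | nil => simp [stepA, stepB]
    | cons b bs =>
      simp only [List.map_cons, stepA, stepB, ge_iff_le]
      split
      · simp [binAbs, countA_append_one]
      · simp [ih]

theorem stepA_unmatched (item kj : Int) (ps : List (Int × Int)) (yv : List (List Int))
    (h : ∀ p ∈ ps, ¬(p.1 ≤ item ∧ item < p.2)) :
    stepA item kj ps yv = yv := by
  induction ps generalizing yv with
  | nil => simp [stepA]
  | cons p ps ih =>
    cases yv with
    | nil => simp [stepA]
    | cons b bs =>
      have hp := h p (by simp)
      simp only [stepA, ge_iff_le]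
      rw [if_neg (by simpa using hp)]
      rw [ih _ (fun q hq => h q (by simp [hq]))]

theorem loop_map_binAbs (x_bids : List (Int × Int)) (x ks : List Int) (n : Nat)
    (yv : List (List Int))
    (h : ∀ j : Nat, j < x.length → ks.length ≤ n + j →
      ∀ p ∈ x_bids, ¬(p.1 ≤ x.getD j 0 ∧ x.getD j 0 < p.2)) :
    loopB x_bids (x.zip (ks.drop n)) (yv.map binAbs)
      = (loopA ks x_bids (x.zipIdx n) yv).map binAbs := by
  induction x generalizing n yv with
  | nil => simp [loopA, loopB]
  | cons a rest ih =>
    simp only [List.zipIdx_cons, loopA]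
    by_cases hn : n < ks.length
    · have hd : ks.drop n = ks[n] :: ks.drop (n + 1) := by
        rw [List.drop_eq_getElem_cons hn]
      have hg : ks.getD n 0 = ks[n] := by
        simp [List.getD_eq_getElem?_getD, List.getElem?_eq_getElem hn]
      rw [hd]
      simp only [List.zip_cons_cons, loopB, hg]
      rw [stepB_map_binAbs]
      exact ih (n + 1) _ (fun j hj hk p hp => by
        have := h (j + 1) (by simpa using Nat.succ_lt_succ hj) (by omega) p hp
        simpa using this)
    · have hd : ks.drop n = [] := List.drop_eq_nil_of_le (by omega)
      have hd1 : ks.drop (n + 1) = [] := List.drop_eq_nil_of_le (by omega)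
      have ha : stepA a (ks.getD n 0) x_bids yv = yv := by
        apply stepA_unmatched
        intro p hp
        have := h 0 (by simp) (by omega) p hp
        simpa using this
      rw [ha, hd]
      have hrest := ih (n + 1) yv (fun j hj hk p hp => by
        have := h (j + 1) (by simpa using Nat.succ_lt_succ hj) (by omega) p hp
        simpa using this)
      rw [hd1] at hrest
      simpa [loopB] using hrest

theorem foldl_append_map (g : List Int → Bool) (l : List (List Int)) (acc : List Bool) :
    l.foldl (fun result bin => result ++ [g bin]) acc = acc ++ l.map g := by
  induction l generalizing acc with
  | nil => simp
  | cons b bs ih => simp [ih]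

theorem empty_outA_eq (bins : List (Int × Int)) :
    empty_outA bins = bins.map (fun _ => ([] : List Int)) := by
  have h : ∀ acc : List (List Int),
      bins.foldl (fun listed _ => listed ++ [[]]) acc = acc ++ bins.map (fun _ => []) := by
    induction bins with
    | nil => simp
    | cons b bs ih => intro acc; simp only [List.foldl_cons, List.map_cons, ih]; simp
  rw [empty_outA, h []]
  simp

-- ===== VERDICT (by name: the statement is the Claim_ definition above) =====
theorem up_lim_analysis_spec : Claim_equal_up_lim_analysis := by
  intro x ks x_bids _ hpre
  unfold Spec_up_lim_analysis up_lim_analysis up_lim_analysis_alt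
  have hinit : List.replicate x_bids.length ((0 : Int), (0 : Int))
      = (empty_outA x_bids).map binAbs := by
    rw [empty_outA_eq]
    simp [binAbs, countA, List.map_const']
  rw [hinit]
  have hx : x.zip ks = x.zip (ks.drop 0) := by simp
  rw [hx, loop_map_binAbs x_bids x ks 0 (empty_outA x_bids)
    (by intro j hj hk p hp; exact hpre j hj (by omega) p hp)]
  rw [foldl_append_map (fun bin => decide ((2 : Int) * countA bin < (bin.length : Int)))]
  simp [binAbs, mul_comm]
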